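-- pv_equiv track=rewrite | github.com/zimmerj271/distributed-api-etl | src/auth/rpc/service.py | valid_port
-- ===== SOURCE A (Python) =====
-- def valid_port(port: int) -> bool:
--     """
--     Verify that port number is not associated to a port already used
--     in Spark or Databricks
--     """
--
--     restrictedport_ranges: list[tuple[int, int]] = [
--         (0, 1023),      # Privileged ports
--         (4040, 4050),   # Spark UI
--         (8443, 8449),   # Databricks services
--         (8649, 8652),   # Ganglia
--         (30000, 30010), # Spark shuffle service
--     ]
--
--     restrictedport_values: set[int] = {
--         22,     # SSH
--         80,     # HTTP
--         443,    # HTTPS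
--         53,     # DNS
--         1433,   # Databases
--         1521,   # Databases
--         2200,   # Databricks Connect
--         3000,   # Grafana
--         5557,   # Databricks internal
--         7077,   # Spark Master
--         7078,   # Spark Master REST
--         8020,   # HDFS NameNode
--         8080,   # Spark Master web UI
--         8888,   # Jupyter
--         9000,   # HDFS NameNode
--         9090,   # Prometheus
--         18080,  # Spark history server
--         50070,  # HDFS NameNode web UI
--         50075,  # HDFS DataNode web UI
--     }
--
--     # if not in range of defined ports
--     if not (0 < port <= 65535):
--         return False
--
--     return not (
--         any(start <= port <= end for start, end in restrictedport_ranges)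
--         or port in restrictedport_values
--     )
-- ===== SOURCE B (Python) =====
-- # B: represent the COMPLEMENT as sorted disjoint intervals of allowed ports
-- # (1..65535 minus all restricted ranges/values, merged by hand) and scan them
-- # with early exit; no separate range guard is needed.
--
-- _ALLOWED = [
--     (1024, 1432), (1434, 1520), (1522, 2199), (2201, 2999), (3001, 4039),
--     (4051, 5556), (5558, 7076), (7079, 8019), (8021, 8079), (8081, 8442),
--     (8450, 8648), (8653, 8887), (8889, 8999), (9001, 9089), (9091, 18079),
--     (18081, 29999), (30011, 50069), (50071, 50074), (50076, 65535),
-- ]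
--
--
-- def valid_port(port: int) -> bool:
--     for lo, hi in _ALLOWED:
--         if port < lo:
--             return False
--         if port <= hi:
--             return True
--     return False
-- ===== Notes on version B (the rewrite author's own statement) =====
-- stated objective: alternative
-- what changed: B replaces the guard + restricted-range scan + restricted-set lookup with its complement: a hand-merged sorted list of disjoint ALLOWED port intervals, scanned with early exit and no separate range guard.
import Mathlib
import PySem

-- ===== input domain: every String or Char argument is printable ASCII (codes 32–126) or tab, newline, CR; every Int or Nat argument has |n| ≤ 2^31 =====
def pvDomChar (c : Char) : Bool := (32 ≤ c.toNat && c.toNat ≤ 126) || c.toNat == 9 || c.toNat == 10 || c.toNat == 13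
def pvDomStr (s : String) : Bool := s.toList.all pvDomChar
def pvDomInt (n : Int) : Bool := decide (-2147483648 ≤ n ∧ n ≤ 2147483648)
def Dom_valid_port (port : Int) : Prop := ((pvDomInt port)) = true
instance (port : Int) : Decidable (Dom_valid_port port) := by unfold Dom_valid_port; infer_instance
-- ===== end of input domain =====

-- B stores the COMPLEMENT — the sorted disjoint intervals of allowed ports — and
-- scans them with early exit (objective: simpler; no guard, no set, no negation).

-- ===== PORT A =====
def valid_port (port : Int) : Bool :=
  let restrictedport_ranges : List (Int × Int) :=
    [(0, 1023), (4040, 4050), (8443, 8449), (8649, 8652), (30000, 30010)]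
  let restrictedport_values : PySem.Set Int :=
    PySem.Set.ofList [22, 80, 443, 53, 1433, 1521, 2200, 3000, 5557, 7077, 7078,
                      8020, 8080, 8888, 9000, 9090, 18080, 50070, 50075]
  if !(decide (0 < port ∧ port ≤ 65535)) then false
  else
    !(restrictedport_ranges.any (fun se => decide (se.1 ≤ port ∧ port ≤ se.2))
      || decide (port ∈ restrictedport_values))

-- ===== PORT B =====
-- the sorted disjoint intervals of ALLOWED ports (1..65535 minus everything restricted)
def pvAllowed : List (Int × Int) :=
  [(1024, 1432), (1434, 1520), (1522, 2199), (2201, 2999), (3001, 4039),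
   (4051, 5556), (5558, 7076), (7079, 8019), (8021, 8079), (8081, 8442),
   (8450, 8648), (8653, 8887), (8889, 8999), (9001, 9089), (9091, 18079),
   (18081, 29999), (30011, 50069), (50071, 50074), (50076, 65535)]

-- early-exit scan of the sorted intervals (B's for-loop with its two returns)
def pvScan (port : Int) : List (Int × Int) → Bool
  | [] => false
  | (lo, hi) :: rest =>
    if port < lo then false
    else if port ≤ hi then true
    else pvScan port rest

def valid_port_alt (port : Int) : Bool := pvScan port pvAllowed

-- ===== PRECONDITION & SPEC =====
def Spec_valid_port (port : Int) (out : Bool) : Prop := out = valid_port_alt port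
instance (port : Int) (out : Bool) : Decidable (Spec_valid_port port out) := by unfold Spec_valid_port; infer_instance

-- ===== CLAIM (what is proved, stated in full; the proofs are below) =====
def Claim_equal_valid_port : Prop := ∀ (port : Int), Dom_valid_port port → Spec_valid_port port (valid_port port)

-- ===== LEMMAS AND PROOFS =====

-- ===== VERDICT (by name: the statement is the Claim_ definition above) =====
set_option maxHeartbeats 1000000 in
theorem valid_port_spec : Claim_equal_valid_port := by
  intro port _
  unfold Spec_valid_port valid_port valid_port_alt pvAllowed
  rw [Bool.eq_iff_iff]
  simp only [pvScan, List.any_cons, List.any_nil, PySem.Set.mem_ofList, List.mem_cons,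
    List.not_mem_nil, or_false, Bool.or_false, Bool.if_true_left, Bool.or_eq_true,
    decide_eq_false_iff_not, decide_eq_true_eq, Bool.not_eq_eq_eq_not,
    Bool.not_true, Bool.false_eq_true, if_false_left, Bool.ite_eq_true_distrib,
    Bool.false_eq_true, not_and, not_lt, not_le,
    Bool.or_eq_false_iff, decide_eq_false_iff_not]
  omega
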